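-- pv_equiv track=rewrite | github.com/NEI-AAUAV/Platform | api-family/app/crud/crud_user.py | _get_inherited_format
-- ===== SOURCE A (Python) =====
-- def _get_inherited_format(role_id: str, org_map: dict) -> str:
--     """
--     Get year_display_format for a role_id by traversing up the hierarchy.
--     If a role doesn't define format, inherit from parent.
--     role_id format: ".2.14." -> checks .2.14., .2. in order
--     Returns: 'civil' or 'academic'
--     """
--     if not role_id:
--         return "civil"
--
--     # Try exact match first
--     if role_id in org_map:
--         fmt = org_map[role_id].get("format")
--         if fmt:  # Has own format defined
--             return fmt
--
--     # Traverse up the hierarchy looking for format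
--     # ".2.14." -> [".2."]
--     parts = role_id.rstrip('.').split('.')
--     for i in range(len(parts) - 1, 0, -1):
--         parent_path = '.'.join(parts[:i]) + '.'
--         parent_info = org_map.get(parent_path)
--         if parent_info and parent_info.get("format"):
--             return parent_info["format"]
--
--     return "civil"
-- ===== SOURCE B (Python) =====
-- def _get_inherited_format(role_id: str, org_map: dict) -> str:
--     # Single pass over org_map: among entries whose key is the role itself or a
--     # dot-terminated prefix of the stripped role_id and whose format is truthy,
--     # the longest key wins (deepest ancestor).  No prefix probing at all.
--     if not role_id:
--         return "civil"
--     t = role_id.rstrip('.')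
--     best_key = None
--     best_fmt = "civil"
--     for key, info in org_map.items():
--         fmt = info.get("format")
--         if fmt and (key == role_id or (key.endswith('.') and t.startswith(key))):
--             if best_key is None or len(best_key) < len(key):
--                 best_key, best_fmt = key, fmt
--     return best_fmt
-- ===== Notes on version B (the rewrite author's own statement) =====
-- stated objective: alternative
-- what changed: B inverts the traversal: instead of generating role_id's ancestor prefixes and probing each against the dict, it makes a single pass over org_map's entries, keeping the longest key that is the role itself or a dot-terminated prefix of the stripped role_id with a truthy format (deepest ancestor wins), so no prefix sequence is ever generated or probed.
import Mathlib
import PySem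

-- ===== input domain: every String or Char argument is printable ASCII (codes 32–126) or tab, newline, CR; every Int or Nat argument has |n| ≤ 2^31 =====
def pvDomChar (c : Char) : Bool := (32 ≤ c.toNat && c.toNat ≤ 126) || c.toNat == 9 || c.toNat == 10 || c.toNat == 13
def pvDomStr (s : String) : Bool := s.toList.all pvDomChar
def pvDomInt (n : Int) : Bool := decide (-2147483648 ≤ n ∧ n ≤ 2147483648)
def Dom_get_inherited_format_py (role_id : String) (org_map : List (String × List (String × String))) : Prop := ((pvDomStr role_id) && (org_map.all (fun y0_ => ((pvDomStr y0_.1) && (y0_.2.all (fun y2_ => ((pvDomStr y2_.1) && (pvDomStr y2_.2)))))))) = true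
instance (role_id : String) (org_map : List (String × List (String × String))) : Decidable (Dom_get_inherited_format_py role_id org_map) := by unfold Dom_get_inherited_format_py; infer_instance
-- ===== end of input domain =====

-- B inverts the traversal: one pass over org_map's entries keeping the longest matching
-- ancestor key, instead of generating and probing role_id's prefix sequence (objective:
-- alternative).


-- ===== PORT A =====
-- role_id.rstrip('.') — exact hand port: removes every trailing '.' (PySem has no rstrip-with-chars)
def pvRstripDots (s : List Char) : List Char := (s.reverse.dropWhile (· == '.')).reverse

-- the for-loop over range(len(parts)-1, 0, -1) with early return
def pvALoop (dm : PySem.Dict String (List (String × String)))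
    (parts : List (List Char)) : List Int → String
  | [] => "civil"
  | i :: rest =>
    let parent_path : String :=
      String.ofList (PySem.Chars.join ['.'] (PySem.List.slice parts none (some i)) ++ ['.'])
    match dm.get? parent_path with
    | some parent_info =>
      if parent_info ≠ [] then            -- `parent_info and …` truthiness
        match (PySem.Dict.mk parent_info).get? "format" with
        | some f => if f ≠ "" then f else pvALoop dm parts rest   -- `…get("format")` truthiness
        | none => pvALoop dm parts rest
      else pvALoop dm parts rest
    | none => pvALoop dm parts rest

def get_inherited_format_py (role_id : String) (org_map : List (String × List (String × String))) : String :=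
  if role_id = "" then "civil"
  else
    let dm : PySem.Dict String (List (String × String)) := PySem.Dict.mk org_map
    -- `if role_id in org_map: fmt = org_map[role_id].get("format"); if fmt: return fmt`
    let exact : Option String :=
      match dm.get? role_id with
      | some info =>
        match (PySem.Dict.mk info).get? "format" with
        | some fmt => if fmt ≠ "" then some fmt else none
        | none => none
      | none => none
    match exact with
    | some fmt => fmt
    | none =>
      let parts := PySem.Chars.splitOn (pvRstripDots role_id.toList) ['.']
      pvALoop dm parts (PySem.List.pyRange ((parts.length : Int) - 1) 0 (-1))

-- ===== PORT B =====
-- loop body: keep (key, fmt) when key is a matching ancestor longer than the best so far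
def pvBStep (role_id t : String) (st : Option String × String)
    (e : String × List (String × String)) : Option String × String :=
  match (PySem.Dict.mk e.2).get? "format" with
  | some fmt =>
    if fmt ≠ "" ∧ (e.1 = role_id ∨ (PySem.Str.endswith e.1 "." = true ∧ PySem.Str.startswith t e.1 = true)) then
      match st.1 with
      | none => (some e.1, fmt)
      | some bk => if PySem.Str.len bk < PySem.Str.len e.1 then (some e.1, fmt) else st
    else st
  | none => st

def get_inherited_format_py_alt (role_id : String) (org_map : List (String × List (String × String))) : String :=
  if role_id = "" then "civil"
  else
    let t : String := String.ofList (pvRstripDots role_id.toList)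
    (org_map.foldl (pvBStep role_id t) (none, "civil")).2

-- ===== PRECONDITION & SPEC =====
-- org_map ports a Python dict, whose keys are necessarily distinct; Pre_ only excludes
-- duplicate-key association lists, which correspond to no Python dict input.
def Pre_get_inherited_format_py (role_id : String) (org_map : List (String × List (String × String))) : Prop :=
  (org_map.map Prod.fst).Nodup
instance (role_id : String) (org_map : List (String × List (String × String))) : Decidable (Pre_get_inherited_format_py role_id org_map) := by unfold Pre_get_inherited_format_py; infer_instance

def pvWitness_get_inherited_format_py : String × (List (String × List (String × String))) :=
  (".2.14.", [(".2.", [("format", "academic")]), (".3.", [])])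

def Spec_get_inherited_format_py (role_id : String) (org_map : List (String × List (String × String))) (out : String) : Prop := out = get_inherited_format_py_alt role_id org_map
instance (role_id : String) (org_map : List (String × List (String × String))) (out : String) : Decidable (Spec_get_inherited_format_py role_id org_map out) := by unfold Spec_get_inherited_format_py; infer_instance

-- ===== CLAIM (what is proved, stated in full; the proofs are below) =====
def Claim_equal_get_inherited_format_py : Prop := ∀ (role_id : String) (org_map : List (String × List (String × String))), Dom_get_inherited_format_py role_id org_map → Pre_get_inherited_format_py role_id org_map → Spec_get_inherited_format_py role_id org_map (get_inherited_format_py role_id org_map)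

-- ===== LEMMAS AND PROOFS =====

-- "the truthy format of an entry's info dict, if any"
def pvFmtOf (info : List (String × String)) : Option String :=
  match (PySem.Dict.mk info).get? "format" with
  | some fmt => if fmt ≠ "" then some fmt else none
  | none => none

-- "the dict's truthy format at key k, if any" (proof-side view of both programs' lookups)
def pvF (dm : PySem.Dict String (List (String × String))) (k : String) : Option String :=
  match dm.get? k with
  | some info => pvFmtOf info
  | none => none

-- "first truthy format among a key list, else civil"
def pvFirstFmt (dm : PySem.Dict String (List (String × String))) : List String → String
  | [] => "civil"
  | k :: ks => match pvF dm k with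
    | some f => f
    | none => pvFirstFmt dm ks

-- the dot-terminated prefixes of t with a dot before position k, longest first
def pvDotKeys (t : List Char) : Nat → List (List Char)
  | 0 => []
  | k + 1 => if t[k]? = some '.' then t.take (k + 1) :: pvDotKeys t k else pvDotKeys t k

-- simple split on '.' (proof-side model of PySem.Chars.splitOn · ['.'])
def pvSplitD : List Char → List (List Char)
  | [] => [[]]
  | c :: rest => if c = '.' then [] :: pvSplitD rest else (pvSplitD rest).modifyHead (c :: ·)

def pvConsPre (pre : List Char) : List (List Char) → List (List Char)
  | [] => [pre]
  | h :: t => (pre ++ h) :: t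

theorem pvSplitD_ne_nil (t : List Char) : pvSplitD t ≠ [] := by
  induction t with
  | nil => simp [pvSplitD]
  | cons c rest ih =>
    simp only [pvSplitD]
    split
    · simp
    · cases h : pvSplitD rest with
      | nil => exact absurd h ih
      | cons a l => simp [List.modifyHead]

theorem pvGo_eq (fuel : Nat) : ∀ (l cur : List Char) (accs : List (List Char)),
    l.length < fuel →
    PySem.Chars.splitOn.go ['.'] fuel l cur accs = accs.reverse ++ pvConsPre cur.reverse (pvSplitD l) := by
  induction fuel with
  | zero => intro l cur accs h; omega
  | succ fuel ih =>
    intro l cur accs h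
    cases l with
    | nil =>
      simp [PySem.Chars.splitOn.go, pvSplitD, pvConsPre]
    | cons c rest =>
      by_cases hc : c = '.'
      · subst hc
        rw [PySem.Chars.splitOn.go]
        have hpre : List.isPrefixOf ['.'] ('.' :: rest) = true := by
          simp [List.isPrefixOf]
        rw [if_pos hpre]
        simp only [List.length_cons, List.drop_succ_cons, List.length_nil, List.drop_zero]
        rw [ih rest [] (cur.reverse :: accs) (by simp at h; omega)]
        rw [pvSplitD, if_pos rfl]
        cases hr : pvSplitD rest with
        | nil => exact absurd hr (pvSplitD_ne_nil rest)
        | cons a l' => simp [pvConsPre]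
      · rw [PySem.Chars.splitOn.go]
        have hpre : List.isPrefixOf ['.'] (c :: rest) = false := by
          simp [List.isPrefixOf]
          exact fun hh => hc hh.symm
        rw [if_neg (by simp [hpre])]
        rw [ih rest (c :: cur) accs (by simp at h ⊢; omega)]
        rw [pvSplitD, if_neg hc]
        cases hr : pvSplitD rest with
        | nil => exact absurd hr (pvSplitD_ne_nil rest)
        | cons a l' => simp [pvConsPre, List.modifyHead]

theorem pvSplitOn_eq_splitD (t : List Char) : PySem.Chars.splitOn t ['.'] = pvSplitD t := by
  rw [PySem.Chars.splitOn, pvGo_eq (t.length + 1) t [] [] (by omega)]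
  cases h : pvSplitD t with
  | nil => exact absurd h (pvSplitD_ne_nil t)
  | cons a l => simp [pvConsPre]

theorem pvSplitD_no_dot {p : List Char} (hp : '.' ∉ p) : pvSplitD p = [p] := by
  induction p with
  | nil => rfl
  | cons c rest ih =>
    simp only [List.mem_cons, not_or] at hp
    rw [pvSplitD, if_neg (fun h => hp.1 h.symm), ih hp.2]
    rfl

theorem pvJoin_cons_cons (a b : List Char) (l : List (List Char)) :
    PySem.Chars.join ['.'] (a :: b :: l) = a ++ '.' :: PySem.Chars.join ['.'] (b :: l) := by
  simp [PySem.Chars.join, List.intercalate, List.intersperse]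

theorem pvJoin_splitD (t : List Char) : PySem.Chars.join ['.'] (pvSplitD t) = t := by
  induction t with
  | nil => simp [pvSplitD, PySem.Chars.join, List.intercalate]
  | cons c rest ih =>
    by_cases hc : c = '.'
    · subst hc
      rw [pvSplitD, if_pos rfl]
      cases hr : pvSplitD rest with
      | nil => exact absurd hr (pvSplitD_ne_nil rest)
      | cons a l =>
        rw [hr] at ih
        rw [pvJoin_cons_cons, ih]
        rfl
    · rw [pvSplitD, if_neg hc]
      cases hr : pvSplitD rest with
      | nil => exact absurd hr (pvSplitD_ne_nil rest)
      | cons a l =>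
        rw [hr] at ih
        cases l with
        | nil =>
          simp [PySem.Chars.join, List.intercalate, List.intersperse] at ih ⊢
          simp [ih]
        | cons b l' =>
          rw [List.modifyHead, pvJoin_cons_cons]
          rw [pvJoin_cons_cons] at ih
          rw [List.cons_append, ih]

theorem pvSplitD_append {s p : List Char} (hp : '.' ∉ p) :
    pvSplitD (s ++ '.' :: p) = pvSplitD s ++ [p] := by
  induction s with
  | nil => simp [pvSplitD, pvSplitD_no_dot hp]
  | cons c s' ih =>
    by_cases hc : c = '.'
    · subst hc
      simp [pvSplitD, ih]
    · simp only [List.cons_append, pvSplitD, if_neg hc, ih]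
      cases h : pvSplitD s' with
      | nil => exact absurd h (pvSplitD_ne_nil s')
      | cons a l => simp [List.modifyHead]

theorem pvALoop_eq_firstFmt (dm : PySem.Dict String (List (String × String)))
    (parts : List (List Char)) (is : List Int) :
    pvALoop dm parts is =
      pvFirstFmt dm (is.map (fun i =>
        String.ofList (PySem.Chars.join ['.'] (PySem.List.slice parts none (some i)) ++ ['.']))) := by
  induction is with
  | nil => rfl
  | cons i rest ih =>
    rw [pvALoop, List.map_cons, pvFirstFmt, ← ih]
    rw [pvF]
    cases dm.get? (String.ofList (PySem.Chars.join ['.'] (PySem.List.slice parts none (some i)) ++ ['.'])) with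
    | none => rfl
    | some info =>
      by_cases hi : info = ([] : List (String × String))
      · subst hi; simp [pvFmtOf, PySem.Dict.get?]
      · simp only [ne_eq, hi, not_false_eq_true, if_true, pvFmtOf]
        cases (PySem.Dict.mk info).get? "format" with
        | none => rfl
        | some f =>
          by_cases hf : f = ""
          · subst hf; simp
          · simp [hf]

def pvKeysA (t : List Char) : List String :=
  (PySem.List.pyRange (((pvSplitD t).length : Int) - 1) 0 (-1)).map (fun i =>
    String.ofList (PySem.Chars.join ['.'] (PySem.List.slice (pvSplitD t) none (some i)) ++ ['.']))

theorem pvLastDot {t : List Char} (h : '.' ∈ t) :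
    ∃ s p, t = s ++ '.' :: p ∧ '.' ∉ p := by
  induction t using List.reverseRecOn with
  | nil => cases h
  | append_singleton ys c ih =>
    by_cases hc : c = '.'
    · subst hc; exact ⟨ys, [], by simp⟩
    · have hy : '.' ∈ ys := by
        rcases List.mem_append.mp h with h' | h'
        · exact h'
        · simp at h'; exact absurd h'.symm hc
      obtain ⟨s, p, hsp, hp⟩ := ih hy
      exact ⟨s, p ++ [c], by simp [hsp], by
        simp only [List.mem_append, List.mem_singleton, not_or]
        exact ⟨hp, fun h' => hc h'.symm⟩⟩

theorem pvDotKeys_skip (t : List Char) (k : Nat) : ∀ (m : Nat), k ≤ m →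
    (∀ d, k ≤ d → d < m → t[d]? ≠ some '.') → pvDotKeys t m = pvDotKeys t k := by
  intro m
  induction m with
  | zero => intro h _; rw [Nat.le_zero.mp h]
  | succ m ih =>
    intro hk hd
    rcases Nat.eq_or_lt_of_le hk with h | h
    · rw [h]
    · rw [pvDotKeys, if_neg (hd m (by omega) (by omega))]
      exact ih (by omega) (fun d h1 h2 => hd d h1 (by omega))

theorem pvDotKeys_prefix (s r : List Char) : ∀ (k : Nat), k ≤ s.length →
    pvDotKeys (s ++ r) k = pvDotKeys s k := by
  intro k
  induction k with
  | zero => intro _; rfl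
  | succ k ih =>
    intro hk
    rw [pvDotKeys, pvDotKeys, List.getElem?_append_left (by omega),
      List.take_append_of_le_length (by omega), ih (by omega)]

theorem pvDotKeys_eq_keysA_aux : ∀ (n : Nat) (t : List Char), t.length ≤ n →
    (pvDotKeys t t.length).map String.ofList = pvKeysA t := by
  intro n
  induction n with
  | zero =>
    intro t ht
    have : t = [] := List.length_eq_zero_iff.mp (by omega)
    subst this
    simp [pvDotKeys, pvKeysA, pvSplitD, PySem.List.pyRange_neg_one_eq_nil (le_refl (0:Int))]
  | succ n ih =>
    intro t ht
    by_cases hdot : '.' ∈ t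
    · obtain ⟨s, p, rfl, hp⟩ := pvLastDot hdot
      have hlen : (s ++ '.' :: p).length = s.length + 1 + p.length := by simp; omega
      have h1 : pvDotKeys (s ++ '.' :: p) (s.length + 1 + p.length)
          = pvDotKeys (s ++ '.' :: p) (s.length + 1) := by
        apply pvDotKeys_skip _ _ _ (by omega)
        intro d h1 h2 hcon
        have hd : d - s.length - 1 < p.length := by omega
        have : (s ++ '.' :: p)[d]? = p[d - s.length - 1]? := by
          rw [List.getElem?_append_right (by omega)]
          have hds : d - s.length = (d - s.length - 1) + 1 := by omega
          rw [hds, List.getElem?_cons_succ]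
          simp
        rw [this] at hcon
        exact hp (List.mem_of_getElem? hcon)
      have h2 : (s ++ '.' :: p)[s.length]? = some '.' := by
        rw [List.getElem?_append_right (by omega)]
        simp
      have h3 : (s ++ '.' :: p).take (s.length + 1) = s ++ ['.'] := by
        rw [List.take_append]
        simp
      have h4 : pvDotKeys (s ++ '.' :: p) s.length = pvDotKeys s s.length := by
        have := pvDotKeys_prefix s ('.' :: p) s.length (le_refl _)
        exact this
      have hs : (pvDotKeys s s.length).map String.ofList = pvKeysA s := ih s (by simp at ht; omega)
      have hsplit : pvSplitD (s ++ '.' :: p) = pvSplitD s ++ [p] := pvSplitD_append hp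
      have hm : 0 < (pvSplitD s).length := List.length_pos_iff.mpr (pvSplitD_ne_nil s)
      have hR : pvKeysA (s ++ '.' :: p) = String.ofList (s ++ ['.']) :: pvKeysA s := by
        rw [pvKeysA, hsplit]
        have hlen2 : (((pvSplitD s ++ [p]).length : Int) - 1) = ((pvSplitD s).length : Int) := by
          simp
        rw [hlen2, PySem.List.pyRange_neg_one_cons (by exact_mod_cast hm), List.map_cons]
        congr 1
        · -- head key
          rw [PySem.List.slice_to_natCast, List.take_left, pvJoin_splitD]
        · -- tail
          rw [pvKeysA]
          apply List.map_congr_left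
          intro i hi
          rw [PySem.List.mem_pyRange_neg_one] at hi
          have h0 : 0 ≤ i := by omega
          have hle : i.toNat ≤ (pvSplitD s).length := by omega
          rw [PySem.List.slice_to (pvSplitD s ++ [p]) h0, PySem.List.slice_to (pvSplitD s) h0,
            List.take_append_of_le_length hle]
      rw [hlen, h1, pvDotKeys, if_pos h2, h3, h4, List.map_cons, hs, hR]
    · have h0 : pvDotKeys t t.length = pvDotKeys t 0 := by
        apply pvDotKeys_skip _ _ _ (by omega)
        intro d _ h2 hcon
        exact hdot (List.mem_of_getElem? hcon)
      rw [h0]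
      rw [pvKeysA, pvSplitD_no_dot hdot]
      simp [pvDotKeys, PySem.List.pyRange_neg_one_eq_nil (le_refl (0:Int))]

-- ===== B-side loop characterization =====

-- the loop's guard as a predicate on an entry
def pvOk (role_id t : String) (e : String × List (String × String)) : Bool :=
  (pvFmtOf e.2).isSome &&
    decide (e.1 = role_id ∨ (PySem.Str.endswith e.1 "." = true ∧ PySem.Str.startswith t e.1 = true))

-- the loop's update on entries passing the guard
def pvUpd (st : Option String × String) (e : String × List (String × String)) :
    Option String × String :=
  match st.1 with
  | none => (some e.1, (pvFmtOf e.2).getD "")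
  | some bk =>
    if PySem.Str.len bk < PySem.Str.len e.1 then (some e.1, (pvFmtOf e.2).getD "") else st

theorem pvBStep_eq (role_id t : String) (st : Option String × String)
    (e : String × List (String × String)) :
    pvBStep role_id t st e = if pvOk role_id t e then pvUpd st e else st := by
  cases hf : (PySem.Dict.mk e.2).get? "format" with
  | none => simp [pvBStep, pvOk, pvFmtOf, hf]
  | some fmt =>
    by_cases hfe : fmt = ""
    · subst hfe; simp [pvBStep, pvOk, pvFmtOf, hf]
    · by_cases hc : e.1 = role_id ∨ (PySem.Str.endswith e.1 "." = true ∧ PySem.Str.startswith t e.1 = true)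
      · cases hst : st.1 <;>
          simp [pvBStep, pvOk, pvUpd, pvFmtOf, hf, hfe, hst]
      · simp [pvBStep, pvOk, pvUpd, pvFmtOf, hf, hfe]

theorem pvFold_filter (rid t : String) (l : List (String × List (String × String)))
    (st : Option String × String) :
    l.foldl (pvBStep rid t) st = (l.filter (pvOk rid t)).foldl pvUpd st := by
  induction l generalizing st with
  | nil => rfl
  | cons e l ih =>
    rw [List.foldl_cons, pvBStep_eq, List.filter_cons]
    by_cases h : pvOk rid t e = true
    · rw [if_pos h, if_pos h, List.foldl_cons, ih]
    · rw [if_neg h, if_neg h, ih]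

theorem pvFold_noupd (l : List (String × List (String × String))) (bk bf : String)
    (h : ∀ e ∈ l, PySem.Str.len e.1 ≤ PySem.Str.len bk) :
    l.foldl pvUpd (some bk, bf) = (some bk, bf) := by
  induction l with
  | nil => rfl
  | cons e l ih =>
    rw [List.foldl_cons]
    have hst : pvUpd (some bk, bf) e = (some bk, bf) := by
      unfold pvUpd
      simp only
      rw [if_neg (by have := h e (by simp); omega)]
    rw [hst]
    exact ih (fun e' he' => h e' (by simp [he']))

theorem pvFold_reach (l : List (String × List (String × String))) :
    ∀ (st : Option String × String),
    l.foldl pvUpd st = st ∨ ∃ e ∈ l, l.foldl pvUpd st = (some e.1, (pvFmtOf e.2).getD "") := by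
  induction l with
  | nil => intro st; left; rfl
  | cons e l ih =>
    intro st
    rw [List.foldl_cons]
    have hstep : pvUpd st e = st ∨ pvUpd st e = (some e.1, (pvFmtOf e.2).getD "") := by
      obtain ⟨st1, st2⟩ := st
      cases st1 with
      | none => right; rfl
      | some bk =>
        by_cases hlt : PySem.Str.len bk < PySem.Str.len e.1
        · right
          show pvUpd (some bk, st2) e = _
          unfold pvUpd
          simp only
          rw [if_pos hlt]
        · left
          show pvUpd (some bk, st2) e = _
          unfold pvUpd
          simp only
          rw [if_neg hlt]
    rcases ih (pvUpd st e) with h | ⟨e', he', h⟩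
    · rcases hstep with h2 | h2
      · left; rw [h, h2]
      · right; exact ⟨e, by simp, by rw [h, h2]⟩
    · right; exact ⟨e', by simp [he'], h⟩

theorem pvFold_max (L1 L2 : List (String × List (String × String)))
    (e : String × List (String × String)) (c : String)
    (h1 : ∀ e' ∈ L1, PySem.Str.len e'.1 < PySem.Str.len e.1)
    (h2 : ∀ e' ∈ L2, PySem.Str.len e'.1 ≤ PySem.Str.len e.1) :
    (L1 ++ e :: L2).foldl pvUpd (none, c) = (some e.1, (pvFmtOf e.2).getD "") := by
  rw [List.foldl_append, List.foldl_cons]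
  rcases pvFold_reach L1 (none, c) with h | ⟨e1, he1, h⟩
  · rw [h]
    have hu : pvUpd (none, c) e = (some e.1, (pvFmtOf e.2).getD "") := rfl
    rw [hu]
    exact pvFold_noupd L2 _ _ h2
  · rw [h]
    have hu : pvUpd (some e1.1, (pvFmtOf e1.2).getD "") e = (some e.1, (pvFmtOf e.2).getD "") := by
      unfold pvUpd
      simp only
      rw [if_pos (h1 e1 he1)]
    rw [hu]
    exact pvFold_noupd L2 _ _ h2

-- ===== the stripped role_id and its dot-terminated prefixes =====

theorem pvRstrip_getLast (s : List Char) : (pvRstripDots s).getLast? ≠ some '.' := by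
  unfold pvRstripDots
  rw [List.getLast?_reverse]
  intro h
  have h2 := List.head?_dropWhile_not (fun c => c == '.') s.reverse
  rw [h] at h2
  simp at h2

theorem pvRstrip_len_le (s : List Char) : (pvRstripDots s).length ≤ s.length := by
  unfold pvRstripDots
  calc ((s.reverse.dropWhile (· == '.')).reverse).length
      = (s.reverse.dropWhile (· == '.')).length := by rw [List.length_reverse]
    _ ≤ s.reverse.length := List.length_dropWhile_le _ _
    _ = s.length := List.length_reverse

theorem pvDotKeys_mem (t : List Char) (k : Nat) (x : List Char) :
    x ∈ pvDotKeys t k ↔ ∃ d, d < k ∧ t[d]? = some '.' ∧ x = t.take (d+1) := by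
  induction k with
  | zero => simp [pvDotKeys]
  | succ k ih =>
    rw [pvDotKeys]
    split
    next hdot =>
      simp only [List.mem_cons, ih]
      constructor
      · rintro (rfl | ⟨d, hd, hd1, hd2⟩)
        · exact ⟨k, by omega, hdot, rfl⟩
        · exact ⟨d, by omega, hd1, hd2⟩
      · rintro ⟨d, hd, hd1, hd2⟩
        by_cases hdk : d = k
        · subst hdk; left; exact hd2
        · right; exact ⟨d, by omega, hd1, hd2⟩
    next hdot =>
      rw [ih]
      constructor
      · rintro ⟨d, hd, hd1, hd2⟩; exact ⟨d, by omega, hd1, hd2⟩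
      · rintro ⟨d, hd, hd1, hd2⟩
        by_cases hdk : d = k
        · subst hdk; exact absurd hd1 hdot
        · exact ⟨d, by omega, hd1, hd2⟩

theorem pvDotKeys_len_le (t : List Char) (k : Nat) (x : List Char) (hx : x ∈ pvDotKeys t k) :
    x.length ≤ k := by
  obtain ⟨d, hd, h1, rfl⟩ := (pvDotKeys_mem t k x).mp hx
  simp [List.length_take]
  omega

theorem pvDotKeys_pairwise (t : List Char) (k : Nat) :
    (pvDotKeys t k).Pairwise (fun a b => b.length < a.length) := by
  induction k with
  | zero => simp [pvDotKeys]
  | succ k ih =>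
    rw [pvDotKeys]
    split
    next hdot =>
      refine List.Pairwise.cons ?_ ih
      intro x hx
      have hk : k < t.length := by
        by_contra hge
        rw [List.getElem?_eq_none (by omega)] at hdot
        cases hdot
      have hle := pvDotKeys_len_le t k x hx
      simp [List.length_take]
      omega
    next => exact ih

theorem pvDotKeys_mem_iff (t : List Char) (x : List Char) :
    x ∈ pvDotKeys t t.length ↔ (['.'] <:+ x ∧ x <+: t) := by
  rw [pvDotKeys_mem]
  constructor
  · rintro ⟨d, hd, h1, rfl⟩
    refine ⟨?_, List.take_prefix _ _⟩
    rw [List.take_add_one, h1]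
    exact ⟨t.take d, rfl⟩
  · rintro ⟨⟨y, hy⟩, hpre⟩
    have hxlen : x.length ≤ t.length := hpre.length_le
    have hxne : x ≠ [] := by
      intro h
      rw [h] at hy
      simp at hy
    have hxpos : 0 < x.length := List.length_pos_iff.mpr hxne
    obtain ⟨r, hr⟩ := hpre
    refine ⟨x.length - 1, by omega, ?_, ?_⟩
    · have hx : x[x.length - 1]? = some '.' := by
        rw [← hy]
        have hl2 : (y ++ ['.']).length - 1 = y.length := by simp
        rw [hl2, List.getElem?_concat_length]
      rw [← hr, List.getElem?_append_left (by omega)]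
      exact hx
    · have hlen1 : x.length - 1 + 1 = x.length := by omega
      rw [← hr, hlen1, List.take_left]

theorem pvDotKeys_len_lt (t : List Char) (hlast : t.getLast? ≠ some '.') (x : List Char)
    (hx : x ∈ pvDotKeys t t.length) : x.length < t.length := by
  obtain ⟨d, hd, h1, rfl⟩ := (pvDotKeys_mem t t.length x).mp hx
  have hne : d ≠ t.length - 1 := by
    intro h
    apply hlast
    rw [List.getLast?_eq_getElem?, ← h]
    exact h1
  simp [List.length_take]
  omega

-- ===== first hit of the candidate list = head of its surviving filter =====

theorem pvFirstFmt_eq_hits (dm : PySem.Dict String (List (String × String))) (ks : List String) :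
    pvFirstFmt dm ks = (match ks.filter (fun k => (pvF dm k).isSome) with
      | [] => "civil"
      | k :: _ => (pvF dm k).getD "civil") := by
  induction ks with
  | nil => rfl
  | cons k ks ih =>
    rw [pvFirstFmt, List.filter_cons]
    cases hf : pvF dm k with
    | some f => simp [hf]
    | none => simp [ih]

-- ===== A as first hit over the candidate key list =====

theorem pvA_eq_firstFmt (role_id : String) (org_map : List (String × List (String × String)))
    (h0 : ¬ role_id = "") :
    get_inherited_format_py role_id org_map =
      pvFirstFmt (PySem.Dict.mk org_map)
        (role_id :: (pvDotKeys (pvRstripDots role_id.toList) (pvRstripDots role_id.toList).length).map String.ofList) := by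
  simp only [get_inherited_format_py, if_neg h0]
  rw [pvFirstFmt]
  cases hget : (PySem.Dict.mk org_map).get? role_id with
  | some info =>
    simp only [pvF, hget, pvFmtOf]
    cases hfm : (PySem.Dict.mk info).get? "format" with
    | some fmt =>
      by_cases hfe : fmt = ""
      · subst hfe
        simp only [ne_eq, not_true_eq_false, if_false]
        rw [pvSplitOn_eq_splitD, pvALoop_eq_firstFmt, ← pvKeysA,
          ← pvDotKeys_eq_keysA_aux (pvRstripDots role_id.toList).length _ (le_refl _)]
      · simp [hfe]
    | none =>
      simp only
      rw [pvSplitOn_eq_splitD, pvALoop_eq_firstFmt, ← pvKeysA,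
        ← pvDotKeys_eq_keysA_aux (pvRstripDots role_id.toList).length _ (le_refl _)]
  | none =>
    simp only [pvF, hget]
    rw [pvSplitOn_eq_splitD, pvALoop_eq_firstFmt, ← pvKeysA,
      ← pvDotKeys_eq_keysA_aux (pvRstripDots role_id.toList).length _ (le_refl _)]

-- ===== VERDICT (by name: the statement is the Claim_ definition above) =====
theorem get_inherited_format_py_spec : Claim_equal_get_inherited_format_py := by
  unfold Claim_equal_get_inherited_format_py
  intro role_id org_map _ hpre
  unfold Spec_get_inherited_format_py
  by_cases h0 : role_id = ""
  · simp [get_inherited_format_py, get_inherited_format_py_alt, h0]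
  · rw [pvA_eq_firstFmt role_id org_map h0]
    simp only [get_inherited_format_py_alt, if_neg h0]
    rw [pvFold_filter]
    set dm := PySem.Dict.mk org_map with hdm
    set tL := pvRstripDots role_id.toList with htL
    set tS := String.ofList tL with htS
    set cand := role_id :: (pvDotKeys tL tL.length).map String.ofList with hcand
    set L := org_map.filter (pvOk role_id tS) with hL
    set hits := cand.filter (fun k => (pvF dm k).isSome) with hhits
    have hkeysnd : dm.keys.Nodup := by
      simpa [PySem.Dict.keys] using hpre
    have hlast : tL.getLast? ≠ some '.' := pvRstrip_getLast _
    have hmemL : ∀ e ∈ L, e.1 ∈ hits ∧ pvF dm e.1 = pvFmtOf e.2 := by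
      intro e heL
      rw [hL, List.mem_filter] at heL
      obtain ⟨hee, hok⟩ := heL
      have hget : dm.get? e.1 = some e.2 :=
        PySem.Dict.get?_of_mem_items dm (by exact hee) hkeysnd
      have hFe : pvF dm e.1 = pvFmtOf e.2 := by simp [pvF, hget]
      rw [pvOk, Bool.and_eq_true] at hok
      obtain ⟨hsome, hcond⟩ := hok
      refine ⟨?_, hFe⟩
      rw [hhits, List.mem_filter]
      refine ⟨?_, by rw [hFe]; exact hsome⟩
      rcases of_decide_eq_true hcond with heq | ⟨hends, hstarts⟩
      · rw [hcand]
        simp [heq]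
      · have h1 : ['.'] <:+ e.1.toList := by
          rw [PySem.Str.endswith_eq] at hends
          have := (PySem.Chars.endswith_iff _ _).mp hends
          simpa using this
        have h2 : e.1.toList <+: tL := by
          rw [PySem.Str.startswith_eq] at hstarts
          have := (PySem.Chars.startswith_iff _ _).mp hstarts
          simpa [htS] using this
        have hmem := (pvDotKeys_mem_iff tL e.1.toList).mpr ⟨h1, h2⟩
        rw [hcand]
        exact List.mem_cons_of_mem _ (List.mem_map.mpr ⟨e.1.toList, hmem, by simp⟩)
    have hmemH : ∀ k ∈ hits, ∃ info, (k, info) ∈ L ∧ dm.get? k = some info := by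
      intro k hk
      rw [hhits, List.mem_filter] at hk
      obtain ⟨hkc, hks⟩ := hk
      have hEx : ∃ info, dm.get? k = some info ∧ (pvFmtOf info).isSome := by
        rw [pvF] at hks
        cases hg : dm.get? k with
        | none => rw [hg] at hks; simp at hks
        | some info => rw [hg] at hks; exact ⟨info, rfl, hks⟩
      obtain ⟨info, hg, hsome⟩ := hEx
      refine ⟨info, ?_, hg⟩
      rw [hL, List.mem_filter]
      refine ⟨PySem.Dict.mem_items_of_get?_eq_some dm hg, ?_⟩
      rw [pvOk, Bool.and_eq_true]
      refine ⟨hsome, ?_⟩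
      rw [hcand] at hkc
      rcases List.mem_cons.mp hkc with rfl | hmap
      · exact decide_eq_true (Or.inl rfl)
      · obtain ⟨x, hx, rfl⟩ := List.mem_map.mp hmap
        obtain ⟨hsuf, hpref⟩ := (pvDotKeys_mem_iff tL x).mp hx
        have hends : PySem.Str.endswith (String.ofList x) "." = true := by
          rw [PySem.Str.endswith_eq]
          rw [PySem.Chars.endswith_iff]
          simpa using hsuf
        have hstarts : PySem.Str.startswith tS (String.ofList x) = true := by
          rw [PySem.Str.startswith_eq]
          rw [PySem.Chars.startswith_iff]
          simpa [htS] using hpref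
        exact decide_eq_true (Or.inr ⟨hends, hstarts⟩)
    have hpair : hits.Pairwise (fun a b => PySem.Str.len b < PySem.Str.len a) := by
      have hcp : cand.Pairwise (fun a b => PySem.Str.len b < PySem.Str.len a) := by
        rw [hcand]
        refine List.Pairwise.cons ?_ ?_
        · intro b hb
          obtain ⟨x, hx, rfl⟩ := List.mem_map.mp hb
          have hlt := pvDotKeys_len_lt tL hlast x hx
          have hle : tL.length ≤ role_id.toList.length := by rw [htL]; exact pvRstrip_len_le _
          have hrl : role_id.toList.length = role_id.length := by simp
          simp [PySem.Str.len_eq]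
          omega
        · refine List.Pairwise.map _ ?_ (pvDotKeys_pairwise tL tL.length)
          intro a b hab
          simp [PySem.Str.len_eq]
          exact_mod_cast hab
      rw [hhits]
      exact hcp.filter _
    rw [pvFirstFmt_eq_hits, ← hhits]
    cases hh : hits with
    | nil =>
      have hLnil : L = [] := by
        rw [List.eq_nil_iff_forall_not_mem]
        intro e he
        have := (hmemL e he).1
        rw [hh] at this
        cases this
      rw [hLnil]
      rfl
    | cons k rest =>
      have hkmem : k ∈ hits := by rw [hh]; exact List.mem_cons_self
      have hksome : (pvF dm k).isSome := by
        rw [hhits, List.mem_filter] at hkmem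
        exact hkmem.2
      obtain ⟨info, hkL, hget⟩ := hmemH k hkmem
      obtain ⟨L1, L2, hLsplit⟩ := List.append_of_mem hkL
      have hndL : (L.map Prod.fst).Nodup := by
        have hsub : L.Sublist org_map := by rw [hL]; exact List.filter_sublist
        exact hpre.sublist (hsub.map Prod.fst)
      have hhead : ∀ b ∈ rest, PySem.Str.len b < PySem.Str.len k := by
        have := hpair
        rw [hh] at this
        exact (List.pairwise_cons.mp this).1
      have hbound : ∀ e', (e' ∈ L1 ∨ e' ∈ L2) → PySem.Str.len e'.1 < PySem.Str.len k := by
        intro e' he'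
        have heL : e' ∈ L := by
          rw [hLsplit]
          rcases he' with h | h
          · exact List.mem_append.mpr (Or.inl h)
          · exact List.mem_append.mpr (Or.inr (List.mem_cons_of_mem _ h))
        have h1 := (hmemL e' heL).1
        have hne : e'.1 ≠ k := by
          intro hkey
          have hnd2 := hndL
          rw [hLsplit] at hnd2
          simp only [List.map_append, List.map_cons] at hnd2
          have hnm := (List.nodup_cons.mp (List.nodup_middle.mp hnd2)).1
          rcases he' with h | h
          · exact hnm (List.mem_append.mpr (Or.inl (hkey ▸ List.mem_map_of_mem h)))
          · exact hnm (List.mem_append.mpr (Or.inr (hkey ▸ List.mem_map_of_mem h)))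
        have hmem2 : e'.1 ∈ rest := by
          rw [hh] at h1
          rcases List.mem_cons.mp h1 with h | h
          · exact absurd h hne
          · exact h
        exact hhead _ hmem2
      rw [hLsplit,
        pvFold_max L1 L2 (k, info) _ (fun e' h => hbound e' (Or.inl h))
          (fun e' h => le_of_lt (hbound e' (Or.inr h)))]
      simp only
      have hFk : pvF dm k = pvFmtOf info := by simp [pvF, hget]
      rw [hFk] at hksome ⊢
      cases hvv : pvFmtOf info with
      | none => rw [hvv] at hksome; simp at hksome
      | some v => simp
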